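-- pv_equiv track=rewrite | github.com/DongEon31/CodingTest_with_Python | LEVEL1/로또의 최고 순위와 최저 순위.py | solution
-- ===== SOURCE A (Python) =====
-- def solution(lottos, win_nums):
--     answer = []
--     right = 0
--     erased = 0
--     for lotto in lottos:
--         if lotto in win_nums:
--             right += 1
--         elif lotto == 0:
--             erased += 1
--
--     if right + erased == 6:
--         answer.append(1)
--     elif right + erased == 5:
--         answer.append(2)
--     elif right + erased == 4:
--         answer.append(3)
--     elif right + erased == 3:
--         answer.append(4)
--     elif right + erased == 2:
--         answer.append(5)
--     else:
--         answer.append(6)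
--
--     if right == 6:
--         answer.append(1)
--     elif right == 5:
--         answer.append(2)
--     elif right == 4:
--         answer.append(3)
--     elif right == 3:
--         answer.append(4)
--     elif right == 2:
--         answer.append(5)
--     else:
--         answer.append(6)
--
--
--
--
--
--     return answer
-- ===== SOURCE B (Python) =====
-- def solution(lottos, win_nums):
--     ls = sorted(lottos)
--     ws = sorted(win_nums)
--     right = 0
--     erased = 0
--     j = 0
--     m = len(ws)
--     for x in ls:
--         while j < m and ws[j] < x:
--             j += 1
--         if j < m and ws[j] == x:
--             right += 1
--         elif x == 0:
--             erased += 1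
--     ranks = (6, 6, 5, 4, 3, 2, 1)
--     best = ranks[right + erased] if right + erased <= 6 else 6
--     worst = ranks[right] if right <= 6 else 6
--     return [best, worst]
-- ===== Notes on version B (the rewrite author's own statement) =====
-- stated objective: faster
-- what changed: Replaces A's per-element linear membership scan of win_nums with sorting both lists and counting matches/blanks in a single two-pointer merge over the sorted lists, and replaces both six-way if/elif cascades with one rank-table lookup ranks[n].
import Mathlib
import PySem

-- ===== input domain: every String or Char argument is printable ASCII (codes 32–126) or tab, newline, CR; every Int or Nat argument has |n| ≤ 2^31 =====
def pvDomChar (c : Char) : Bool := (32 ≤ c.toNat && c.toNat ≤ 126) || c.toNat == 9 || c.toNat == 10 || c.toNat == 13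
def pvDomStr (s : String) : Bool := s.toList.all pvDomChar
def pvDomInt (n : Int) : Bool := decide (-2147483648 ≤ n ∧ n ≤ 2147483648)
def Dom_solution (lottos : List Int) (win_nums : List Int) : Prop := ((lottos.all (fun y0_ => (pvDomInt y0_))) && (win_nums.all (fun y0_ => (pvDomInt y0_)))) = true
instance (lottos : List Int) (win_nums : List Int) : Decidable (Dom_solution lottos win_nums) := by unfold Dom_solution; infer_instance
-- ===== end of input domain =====

-- B replaces A's per-element membership scan by sorting both lists and counting matches with a
-- two-pointer merge, and both if/elif cascades by one rank-table lookup (objective: faster, O(n log n + m log m) vs O(n*m)).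


-- ===== PORT A =====
def solution (lottos : List Int) (win_nums : List Int) : List Int :=
  let st := lottos.foldl (fun (s : Int × Int) lotto =>
    if lotto ∈ win_nums then (s.1 + 1, s.2)
    else if lotto = 0 then (s.1, s.2 + 1)
    else s) (0, 0)
  let right := st.1
  let erased := st.2
  let best : Int :=
    if right + erased = 6 then 1
    else if right + erased = 5 then 2
    else if right + erased = 4 then 3
    else if right + erased = 3 then 4
    else if right + erased = 2 then 5
    else 6
  let worst : Int :=
    if right = 6 then 1
    else if right = 5 then 2
    else if right = 4 then 3
    else if right = 3 then 4
    else if right = 2 then 5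
    else 6
  [best, worst]

-- ===== PORT B =====
-- two-pointer merge over the two sorted lists: the Python `while j < m and ws[j] < x: j += 1`
-- advances the pointer, modelled here by dropping the already-passed prefix of ws
def pvMerge : List Int → List Int → Nat → Nat → Nat × Nat
  | [], _, r, e => (r, e)
  | x :: rest, ws, r, e =>
    match ws.dropWhile (fun w => decide (w < x)) with
    | w :: t =>
      if w = x then pvMerge rest (w :: t) (r + 1) e
      else if x = 0 then pvMerge rest (w :: t) r (e + 1)
      else pvMerge rest (w :: t) r e
    | [] =>
      if x = 0 then pvMerge rest [] r (e + 1) else pvMerge rest [] r e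

def pvRanks : List Int := [6, 6, 5, 4, 3, 2, 1]

def solution_alt (lottos : List Int) (win_nums : List Int) : List Int :=
  let ls := PySem.List.sorted lottos (fun x => x) false
  let ws := PySem.List.sorted win_nums (fun x => x) false
  let c := pvMerge ls ws 0 0
  let right := c.1
  let erased := c.2
  let best : Int := if right + erased ≤ 6 then pvRanks.getD (right + erased) 6 else 6
  let worst : Int := if right ≤ 6 then pvRanks.getD right 6 else 6
  [best, worst]

-- ===== PRECONDITION & SPEC =====
def Spec_solution (lottos : List Int) (win_nums : List Int) (out : List Int) : Prop := out = solution_alt lottos win_nums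
instance (lottos : List Int) (win_nums : List Int) (out : List Int) : Decidable (Spec_solution lottos win_nums out) := by unfold Spec_solution; infer_instance

-- ===== CLAIM (what is proved, stated in full; the proofs are below) =====
def Claim_equal_solution : Prop := ∀ (lottos : List Int) (win_nums : List Int), Dom_solution lottos win_nums → Spec_solution lottos win_nums (solution lottos win_nums)

-- ===== LEMMAS AND PROOFS =====

-- head of a dropWhile does not satisfy the predicate
theorem pvDropWhile_head_not {p : Int → Bool} : ∀ {ws : List Int} {w : Int} {t : List Int},
    ws.dropWhile p = w :: t → p w = false := by
  intro ws
  induction ws with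
  | nil => intro w t h; simp [List.dropWhile] at h
  | cons a as ih =>
    intro w t h
    by_cases hp : p a = true
    · rw [List.dropWhile_cons_of_pos hp] at h; exact ih h
    · rw [List.dropWhile_cons_of_neg hp] at h
      cases h; simpa using hp

-- membership is unchanged by dropping strictly smaller elements, for y ≥ x
theorem pvMem_dropWhile {ws : List Int} {x y : Int} (hxy : x ≤ y) :
    (y ∈ ws.dropWhile (fun w => decide (w < x))) ↔ y ∈ ws := by
  constructor
  · intro h; exact (List.dropWhile_sublist _).subset h
  · intro h
    rw [← List.takeWhile_append_dropWhile (p := fun w => decide (w < x)) (l := ws)] at h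
    rcases List.mem_append.mp h with h1 | h2
    · have := List.mem_takeWhile_imp h1; simp at this; omega
    · exact h2

-- what the merge computes: the two counts, relative to the current ws suffix
theorem pvMerge_eq : ∀ (ls ws : List Int) (r e : Nat),
    ls.Pairwise (· ≤ ·) → ws.Pairwise (· ≤ ·) →
    pvMerge ls ws r e
      = (r + ls.countP (fun x => decide (x ∈ ws)),
         e + ls.countP (fun x => decide (x = 0 ∧ x ∉ ws))) := by
  intro ls
  induction ls with
  | nil => intro ws r e _ _; simp [pvMerge]
  | cons x rest ih =>
    intro ws r e hls hws
    rw [List.pairwise_cons] at hls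
    obtain ⟨hxle, hrest⟩ := hls
    have hws' : (ws.dropWhile (fun w => decide (w < x))).Pairwise (· ≤ ·) :=
      hws.sublist (List.dropWhile_sublist _)
    have hcount1 : rest.countP (fun y => decide (y ∈ ws.dropWhile (fun w => decide (w < x))))
        = rest.countP (fun y => decide (y ∈ ws)) := by
      apply List.countP_congr; intro y hy
      simp [pvMem_dropWhile (hxle y hy)]
    have hcount2 : rest.countP (fun y => decide (y = 0 ∧ y ∉ ws.dropWhile (fun w => decide (w < x))))
        = rest.countP (fun y => decide (y = 0 ∧ y ∉ ws)) := by
      apply List.countP_congr; intro y hy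
      simp [pvMem_dropWhile (hxle y hy)]
    cases hdw : ws.dropWhile (fun w => decide (w < x)) with
    | nil =>
      have hx : x ∉ ws := by
        intro hmem
        have := (pvMem_dropWhile (le_refl x)).mpr hmem
        rw [hdw] at this; simp at this
      rw [hdw] at hcount1 hcount2 hws'
      simp only [pvMerge, hdw]
      by_cases h0 : x = 0
      · subst h0
        rw [if_pos rfl, ih [] r (e + 1) hrest hws', hcount1, hcount2]
        simp [hx, Prod.ext_iff]
        omega
      · rw [if_neg h0, ih [] r e hrest hws', hcount1, hcount2]
        simp [hx, h0]
    | cons w t =>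
      have hwx : ¬ (w < x) := by
        have := pvDropWhile_head_not hdw; simpa using this
      rw [hdw] at hcount1 hcount2 hws'
      simp only [pvMerge, hdw]
      by_cases hwe : w = x
      · have hxin : x ∈ ws := by
          refine (pvMem_dropWhile (le_refl x)).mp ?_
          rw [hdw, hwe]; exact List.mem_cons_self ..
        rw [if_pos hwe, ih (w :: t) (r + 1) e hrest hws', hcount1, hcount2]
        simp [List.countP_cons, hxin, Prod.ext_iff]
        omega
      · have hxout : x ∉ ws := by
          intro hmem
          have hx' : x ∈ w :: t := by
            rw [← hdw]; exact (pvMem_dropWhile (le_refl x)).mpr hmem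
          rcases List.mem_cons.mp hx' with h | h
          · exact hwe h.symm
          · have hle : w ≤ x := (List.pairwise_cons.mp hws').1 x h
            have : w = x := le_antisymm hle (not_lt.mp hwx)
            exact hwe this
        by_cases h0 : x = 0
        · subst h0
          rw [if_neg (fun h => hwe h), if_pos rfl, ih (w :: t) r (e + 1) hrest hws', hcount1, hcount2]
          simp [List.countP_cons, hxout, Prod.ext_iff]
          omega
        · rw [if_neg (fun h => hwe h), if_neg h0, ih (w :: t) r e hrest hws', hcount1, hcount2]
          simp [hxout, h0]

-- A's loop computes the same two counts
theorem pvFold_eq (w : List Int) : ∀ (l : List Int) (r e : Int),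
    l.foldl (fun (s : Int × Int) lotto =>
      if lotto ∈ w then (s.1 + 1, s.2)
      else if lotto = 0 then (s.1, s.2 + 1)
      else s) (r, e)
    = (r + (l.countP (fun x => decide (x ∈ w)) : Nat),
       e + (l.countP (fun x => decide (x = 0 ∧ x ∉ w)) : Nat)) := by
  intro l
  induction l with
  | nil => intro r e; simp
  | cons x rest ih =>
    intro r e
    by_cases hx : x ∈ w
    · simp only [List.foldl_cons, if_pos hx, ih]
      simp [List.countP_cons, hx, Prod.ext_iff]
      omega
    · by_cases h0 : x = 0
      · subst h0
        simp only [List.foldl_cons, if_neg hx, if_pos rfl, ih]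
        simp [hx, Prod.ext_iff]
        omega
      · simp only [List.foldl_cons, if_neg hx, if_neg h0, ih]
        simp [hx, h0]

-- the six-way cascade is the rank-table lookup
theorem pvChain_eq (n : Nat) :
    (if (n : Int) = 6 then (1 : Int) else if (n : Int) = 5 then 2 else if (n : Int) = 4 then 3
     else if (n : Int) = 3 then 4 else if (n : Int) = 2 then 5 else 6)
    = (if n ≤ 6 then pvRanks.getD n 6 else 6) := by
  by_cases h : n ≤ 6
  · interval_cases n <;> decide
  · rw [if_neg h]; split_ifs <;> first | rfl | omega

-- ===== VERDICT (by name: the statement is the Claim_ definition above) =====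
theorem solution_spec : Claim_equal_solution := by
  intro lottos win_nums _
  unfold Spec_solution solution solution_alt
  dsimp only
  rw [pvFold_eq]
  rw [pvMerge_eq _ _ 0 0 (PySem.List.sorted_pairwise lottos (fun x => x))
        (PySem.List.sorted_pairwise win_nums (fun x => x))]
  have hm1 : (PySem.List.sorted lottos (fun x => x) false).countP
        (fun x => decide (x ∈ PySem.List.sorted win_nums (fun x => x) false))
      = lottos.countP (fun x => decide (x ∈ win_nums)) := by
    rw [(PySem.List.sorted_perm lottos (fun x => x) false).countP_eq]
    apply List.countP_congr; intro y _
    simp [PySem.List.mem_sorted]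
  have hm2 : (PySem.List.sorted lottos (fun x => x) false).countP
        (fun x => decide (x = 0 ∧ x ∉ PySem.List.sorted win_nums (fun x => x) false))
      = lottos.countP (fun x => decide (x = 0 ∧ x ∉ win_nums)) := by
    rw [(PySem.List.sorted_perm lottos (fun x => x) false).countP_eq]
    apply List.countP_congr; intro y _
    simp [PySem.List.mem_sorted]
  simp only [hm1, hm2, Nat.zero_add, Int.zero_add]
  set c1 := lottos.countP (fun x => decide (x ∈ win_nums)) with hc1
  set c2 := lottos.countP (fun x => decide (x = 0 ∧ x ∉ win_nums)) with hc2
  have hcast : ((c1 : Int) + (c2 : Int)) = ((c1 + c2 : Nat) : Int) := by push_cast; ring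
  rw [hcast, pvChain_eq (c1 + c2), pvChain_eq c1]
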